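-- pv_equiv track=rewrite | github.com/canadavid1/DAT120 | prosjekt/prosjekt.py | hb
-- ===== SOURCE A (Python) =====
-- def hb(l : list[int]) -> tuple[int,int,int]:
--     l = [x if x < 0 else 0 if x < 5 else x for x in l]
--     minVal = 0
--     minValidx = 0
--     maxdiff = 0
--     maxIdx = 0
--     ps = 0
--     for i in range(len(l)):
--         ps += l[i]
--         if l[i] - minVal > maxdiff:
--             maxdiff = l[i] - minVal
--             maxIdx = i
--         if ps < minVal:
--             minVal = ps
--             minValidx = i
--
--     return (minValidx,maxIdx,maxdiff)
-- ===== SOURCE B (Python) =====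
-- def hb(l: list[int]) -> tuple[int, int, int]:
--     t = [x if x < 0 else 0 if x < 5 else x for x in l]
--     # pass 1: min prefix sum (baseline 0), its first index, and for each i the
--     # minimum prefix sum over indices strictly before i
--     minBefore = []
--     ps = 0
--     mv = 0
--     minValidx = 0
--     for i, x in enumerate(t):
--         minBefore.append(mv)
--         ps += x
--         if ps < mv:
--             mv = ps
--             minValidx = i
--     # pass 2: first index maximising x - minBefore[i] (strictly, baseline 0)
--     maxdiff = 0
--     maxIdx = 0
--     for i, (x, mb) in enumerate(zip(t, minBefore)):
--         d = x - mb
--         if d > maxdiff: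
--             maxdiff = d
--             maxIdx = i
--     return (minValidx, maxIdx, maxdiff)
-- ===== Notes on version B (the rewrite author's own statement) =====
-- stated objective: alternative
-- what changed: A interleaves both optimisations in one indexed loop over one running state; B decomposes it into two passes: a first pass that materialises the strictly-before prefix-minimum array (and the min-prefix-sum index), and a second pass over zip(t, minBefore) that picks the first index maximising x - minBefore[i].
import Mathlib
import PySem

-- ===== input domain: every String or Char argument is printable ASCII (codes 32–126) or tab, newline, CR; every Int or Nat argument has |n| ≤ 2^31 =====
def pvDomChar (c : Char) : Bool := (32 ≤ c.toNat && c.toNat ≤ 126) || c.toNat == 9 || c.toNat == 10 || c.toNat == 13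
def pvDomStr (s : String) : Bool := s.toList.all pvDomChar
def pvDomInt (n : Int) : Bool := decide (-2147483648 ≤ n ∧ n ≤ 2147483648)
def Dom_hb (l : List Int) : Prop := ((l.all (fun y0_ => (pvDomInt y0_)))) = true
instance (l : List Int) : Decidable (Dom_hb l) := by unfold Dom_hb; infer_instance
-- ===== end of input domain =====

-- B replaces A's single interleaved indexed loop by two passes (prefix-min-before array, then max-difference scan); alternative decomposition, same cost.


-- ===== PORT A =====
-- for i in range(len(l)) with l[i]; index always in range, so pyGetD is exact here
def hb (l : List Int) : Int × Int × Int :=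
  let l' := l.map (fun x => if x < 0 then x else if x < 5 then 0 else x)
  let st := (PySem.List.pyRange 0 (PySem.List.len l') 1).foldl
    (fun (s : Int × Int × Int × Int × Int) (i : Int) =>
      let (minVal, minValidx, maxdiff, maxIdx, ps) := s
      let li := PySem.List.pyGetD l' i 0
      let ps := ps + li
      let (maxdiff, maxIdx) := if li - minVal > maxdiff then (li - minVal, i) else (maxdiff, maxIdx)
      let (minVal, minValidx) := if ps < minVal then (ps, i) else (minVal, minValidx)
      (minVal, minValidx, maxdiff, maxIdx, ps))
    (0, 0, 0, 0, 0)
  (st.2.1, st.2.2.2.1, st.2.2.1)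

-- ===== PORT B =====
def hb_alt (l : List Int) : Int × Int × Int :=
  let t := l.map (fun x => if x < 0 then x else if x < 5 then 0 else x)
  -- pass 1: minBefore list, prefix sum, running min, its first index
  let p1 := (PySem.List.enumerate t).foldl
    (fun (s : List Int × Int × Int × Int) (p : Int × Int) =>
      let (mb, ps, mv, mvi) := s
      let mb := mb ++ [mv]
      let ps := ps + p.2
      if ps < mv then (mb, ps, ps, p.1) else (mb, ps, mv, mvi))
    ([], 0, 0, 0)
  let minBefore := p1.1
  let minValidx := p1.2.2.2
  -- pass 2: first index where x - minBefore[i] strictly exceeds the running max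
  let p2 := (PySem.List.enumerate (t.zip minBefore)).foldl
    (fun (s : Int × Int) (p : Int × (Int × Int)) =>
      let d := p.2.1 - p.2.2
      if d > s.1 then (d, p.1) else s)
    (0, 0)
  (minValidx, p2.2, p2.1)

-- ===== PRECONDITION & SPEC =====
def Spec_hb (l : List Int) (out : Int × Int × Int) : Prop := out = hb_alt l
instance (l : List Int) (out : Int × Int × Int) : Decidable (Spec_hb l out) := by unfold Spec_hb; infer_instance

-- ===== CLAIM (what is proved, stated in full; the proofs are below) =====
def Claim_equal_hb : Prop := ∀ (l : List Int), Dom_hb l → Spec_hb l (hb l)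

-- ===== LEMMAS AND PROOFS =====

-- reference structural recursion: A's loop body, one element at a time
def specLoop : List Int → Int → Int → Int → Int → Int → Int → Int × Int × Int
  | [], _, _, mvi, md, mi, _ => (mvi, mi, md)
  | x :: xs, i, mv, mvi, md, mi, ps =>
    let ps' := ps + x
    let md' := if x - mv > md then x - mv else md
    let mi' := if x - mv > md then i else mi
    let mv' := if ps' < mv then ps' else mv
    let mvi' := if ps' < mv then i else mvi
    specLoop xs (i + 1) mv' mvi' md' mi' ps'

-- the strictly-before prefix minima B's first pass materialises
def mbList : List Int → Int → Int → List Int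
  | [], _, _ => []
  | x :: xs, ps, mv => mv :: mbList xs (ps + x) (if ps + x < mv then ps + x else mv)

-- the (mv, mvi) channel of pass 1
def pass1mv : List Int → Int → Int → Int → Int → Int × Int
  | [], _, _, mv, mvi => (mv, mvi)
  | x :: xs, i, ps, mv, mvi =>
    if ps + x < mv then pass1mv xs (i + 1) (ps + x) (ps + x) i
    else pass1mv xs (i + 1) (ps + x) mv mvi

theorem pass1_eq (xs : List Int) : ∀ (i : Int) (mb : List Int) (ps mv mvi : Int),
    (PySem.List.enumerate xs i).foldl
      (fun (s : List Int × Int × Int × Int) (p : Int × Int) =>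
        let (mb, ps, mv, mvi) := s
        let mb := mb ++ [mv]
        let ps := ps + p.2
        if ps < mv then (mb, ps, ps, p.1) else (mb, ps, mv, mvi))
      (mb, ps, mv, mvi)
    = (mb ++ mbList xs ps mv, ps + xs.sum, pass1mv xs i ps mv mvi) := by
  induction xs with
  | nil =>
    intro i mb ps mv mvi
    simp [PySem.List.enumerate_nil, mbList, pass1mv]
  | cons x xs ih =>
    intro i mb ps mv mvi
    rw [PySem.List.enumerate_cons, List.foldl_cons]
    by_cases h : ps + x < mv
    · simp only [h, mbList, pass1mv, if_true, ih]
      simp [List.append_assoc]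
      omega
    · simp only [mbList, pass1mv, h, if_false, ih]
      simp [List.append_assoc]
      omega

theorem main_eq (xs : List Int) : ∀ (i mv mvi md mi ps : Int),
    specLoop xs i mv mvi md mi ps =
      ((pass1mv xs i ps mv mvi).2,
       ((PySem.List.enumerate (xs.zip (mbList xs ps mv)) i).foldl
          (fun (s : Int × Int) (p : Int × (Int × Int)) =>
            let d := p.2.1 - p.2.2
            if d > s.1 then (d, p.1) else s)
          (md, mi)).2,
       ((PySem.List.enumerate (xs.zip (mbList xs ps mv)) i).foldl
          (fun (s : Int × Int) (p : Int × (Int × Int)) =>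
            let d := p.2.1 - p.2.2
            if d > s.1 then (d, p.1) else s)
          (md, mi)).1) := by
  induction xs with
  | nil =>
    intro i mv mvi md mi ps
    simp [specLoop, pass1mv, mbList, PySem.List.enumerate_nil]
  | cons x xs ih =>
    intro i mv mvi md mi ps
    simp only [specLoop, pass1mv, mbList, List.zip_cons_cons, PySem.List.enumerate_cons,
      List.foldl_cons]
    by_cases h1 : ps + x < mv <;> by_cases h2 : x - mv > md <;>
      simp only [h1, h2, if_true, if_false] <;> rw [ih]

theorem enumFold_extract (xs : List Int) : ∀ (i mv mvi md mi ps : Int),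
    (fun st : Int × Int × Int × Int × Int => (st.2.1, st.2.2.2.1, st.2.2.1))
      ((PySem.List.enumerate xs i).foldl
        (fun (s : Int × Int × Int × Int × Int) (p : Int × Int) =>
          let (minVal, minValidx, maxdiff, maxIdx, ps) := s
          let li := p.2
          let ps := ps + li
          let (maxdiff, maxIdx) := if li - minVal > maxdiff then (li - minVal, p.1) else (maxdiff, maxIdx)
          let (minVal, minValidx) := if ps < minVal then (ps, p.1) else (minVal, minValidx)
          (minVal, minValidx, maxdiff, maxIdx, ps))
        (mv, mvi, md, mi, ps))
    = specLoop xs i mv mvi md mi ps := by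
  induction xs with
  | nil =>
    intro i mv mvi md mi ps
    simp [PySem.List.enumerate_nil, specLoop]
  | cons x xs ih =>
    intro i mv mvi md mi ps
    rw [PySem.List.enumerate_cons, List.foldl_cons]
    simp only [specLoop]
    by_cases h1 : ps + x < mv <;> by_cases h2 : x - mv > md <;>
      simp only [h1, h2, if_true, if_false] <;> rw [← ih]

theorem hb_eq_spec (l : List Int) :
    hb l = specLoop (l.map (fun x => if x < 0 then x else if x < 5 then 0 else x)) 0 0 0 0 0 0 := by
  unfold hb
  rw [← enumFold_extract]
  rw [PySem.List.enumerate_eq_map_pyRange (d := 0), List.foldl_map]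

theorem hb_alt_eq (l : List Int) :
    hb_alt l = specLoop (l.map (fun x => if x < 0 then x else if x < 5 then 0 else x)) 0 0 0 0 0 0 := by
  unfold hb_alt
  rw [main_eq]
  simp only [pass1_eq, List.nil_append]

-- ===== VERDICT (by name: the statement is the Claim_ definition above) =====
theorem hb_spec : Claim_equal_hb := by
  intro l _
  unfold Spec_hb
  rw [hb_eq_spec, hb_alt_eq]
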